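-- pv_equiv track=rewrite | github.com/thothforge/thothctl | src/thothctl/services/check/project/drift/drift_service.py | _matches_tags
-- ===== SOURCE A (Python) =====
-- def _matches_tags(resource_tags: dict, filter_tags: dict) -> bool:
--     """Return True if resource_tags contain ALL filter_tags (key=value).
--
--     Supports:
--       - Exact match:  env=prod
--       - Wildcard value: env=*  (key must exist, any value)
--       - Key-only: team (key must exist, shorthand for team=*)
--     """
--     if not filter_tags:
--         return True
--     if not resource_tags:
--         return False
--     for key, value in filter_tags.items():
--         if key not in resource_tags:
--             return False
--         if value not in ("*", ""):
--             if resource_tags[key] != value: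
--                 return False
--     return True
-- ===== SOURCE B (Python) =====
-- def _matches_tags(resource_tags: dict, filter_tags: dict) -> bool:
--     """Subset-containment formulation: split filter_tags once into required
--     keys (wildcard/empty value) and exact pairs, then test two subset relations."""
--     required_keys = {k for k, v in filter_tags.items() if v in ("*", "")}
--     exact_pairs = {(k, v) for k, v in filter_tags.items() if v not in ("*", "")}
--     return required_keys <= resource_tags.keys() and exact_pairs <= set(resource_tags.items())
-- ===== Notes on version B (the rewrite author's own statement) =====
-- stated objective: idiomatic
-- what changed: Replaces A's short-circuit loop over filter_tags with one pass splitting filter_tags into a set of required keys (wildcard/empty values) and a set of exact (key,value) pairs, returning the conjunction of two subset tests against resource_tags' keys and items.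
import Mathlib
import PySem

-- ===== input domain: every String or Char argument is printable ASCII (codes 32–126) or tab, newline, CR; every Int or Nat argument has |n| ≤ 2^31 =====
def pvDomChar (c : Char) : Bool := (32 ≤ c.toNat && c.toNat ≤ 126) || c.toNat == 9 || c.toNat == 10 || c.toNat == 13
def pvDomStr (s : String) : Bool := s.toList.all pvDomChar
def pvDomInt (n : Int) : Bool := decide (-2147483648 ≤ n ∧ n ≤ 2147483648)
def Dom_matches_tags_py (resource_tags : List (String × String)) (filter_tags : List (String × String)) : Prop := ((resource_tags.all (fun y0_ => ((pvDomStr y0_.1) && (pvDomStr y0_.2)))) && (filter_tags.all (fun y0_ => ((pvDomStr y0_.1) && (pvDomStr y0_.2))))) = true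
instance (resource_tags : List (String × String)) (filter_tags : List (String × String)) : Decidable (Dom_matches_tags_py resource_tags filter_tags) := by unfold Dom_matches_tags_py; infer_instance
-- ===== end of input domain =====

-- B replaces A's short-circuit loop by two subset checks over sets built in one pass (idiomatic/alternative; not faster).

-- ===== PORT A =====
-- 'for key, value in filter_tags.items(): …' with early returns
def matchesTagsLoop (resource_tags : List (String × String)) : List (String × String) → Bool
  | [] => true
  | (key, value) :: rest =>
    match resource_tags.find? (fun p => p.1 == key) with   -- 'key not in resource_tags' / 'resource_tags[key]' (first match)
    | none => false
    | some p =>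
      if value == "*" || value == "" then matchesTagsLoop resource_tags rest
      else if p.2 == value then matchesTagsLoop resource_tags rest
      else false

def matches_tags_py (resource_tags : List (String × String)) (filter_tags : List (String × String)) : Bool :=
  if filter_tags.isEmpty then true
  else if resource_tags.isEmpty then false
  else matchesTagsLoop resource_tags filter_tags

-- ===== PORT B =====
def matches_tags_py_alt (resource_tags : List (String × String)) (filter_tags : List (String × String)) : Bool :=
  let required_keys : PySem.Set String :=
    PySem.Set.ofList ((filter_tags.filter (fun p => p.2 == "*" || p.2 == "")).map Prod.fst)
  let exact_pairs : PySem.Set (String × String) :=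
    PySem.Set.ofList (filter_tags.filter (fun p => !(p.2 == "*" || p.2 == "")))
  PySem.Set.issubset required_keys (resource_tags.map Prod.fst) &&
    PySem.Set.issubset exact_pairs resource_tags

-- ===== PRECONDITION & SPEC =====
-- Pre_ only states dict well-formedness: the association lists encode Python dicts, whose
-- keys are necessarily distinct, so no reachable Python input is excluded.
def Pre_matches_tags_py (resource_tags : List (String × String)) (filter_tags : List (String × String)) : Prop :=
  (resource_tags.map Prod.fst).Nodup ∧ (filter_tags.map Prod.fst).Nodup
instance (resource_tags : List (String × String)) (filter_tags : List (String × String)) : Decidable (Pre_matches_tags_py resource_tags filter_tags) := by unfold Pre_matches_tags_py; infer_instance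

def pvWitness_matches_tags_py : (List (String × String)) × (List (String × String)) :=
  ([("env", "prod"), ("team", "x")], [("env", "prod"), ("team", "*")])

def Spec_matches_tags_py (resource_tags : List (String × String)) (filter_tags : List (String × String)) (out : Bool) : Prop := out = matches_tags_py_alt resource_tags filter_tags
instance (resource_tags : List (String × String)) (filter_tags : List (String × String)) (out : Bool) : Decidable (Spec_matches_tags_py resource_tags filter_tags out) := by unfold Spec_matches_tags_py; infer_instance

-- ===== CLAIM (what is proved, stated in full; the proofs are below) =====
def Claim_equal_matches_tags_py : Prop := ∀ (resource_tags : List (String × String)) (filter_tags : List (String × String)), Dom_matches_tags_py resource_tags filter_tags → Pre_matches_tags_py resource_tags filter_tags → Spec_matches_tags_py resource_tags filter_tags (matches_tags_py resource_tags filter_tags)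

-- ===== LEMMAS AND PROOFS =====

-- With distinct resource keys, the first-match lookup finds exactly the stored pair.
theorem find_eq_of_mem (r : List (String × String)) (hr : (r.map Prod.fst).Nodup)
    (k v : String) (h : (k, v) ∈ r) : r.find? (fun p => p.1 == k) = some (k, v) := by
  induction r with
  | nil => cases h
  | cons a t ih =>
    simp only [List.map_cons, List.nodup_cons] at hr
    rcases List.mem_cons.mp h with h | h
    · subst h; simp [List.find?]
    · have hka : ¬ (a.1 == k) = true := by
        intro hc
        exact hr.1 (by
          have : a.1 = k := by simpa using hc
          subst this
          exact List.mem_map.mpr ⟨(a.1, v), h, rfl⟩)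
      simp [List.find?, hka, ih hr.2 h]

theorem loop_iff (r f : List (String × String)) (hr : (r.map Prod.fst).Nodup) :
    matchesTagsLoop r f = true ↔
      ((∀ p ∈ f, (p.2 = "*" ∨ p.2 = "") → p.1 ∈ r.map Prod.fst) ∧
       (∀ p ∈ f, ¬(p.2 = "*" ∨ p.2 = "") → p ∈ r)) := by
  induction f with
  | nil => simp [matchesTagsLoop]
  | cons a rest ih =>
    obtain ⟨k, v⟩ := a
    simp only [matchesTagsLoop]
    cases hfind : r.find? (fun p => p.1 == k) with
    | none =>
      have hk : k ∉ r.map Prod.fst := by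
        intro hk
        obtain ⟨p, hp, hpk⟩ := List.mem_map.mp hk
        have := List.find?_eq_none.mp hfind p hp
        simp [hpk] at this
      constructor
      · intro h; cases h
      · rintro ⟨h1, h2⟩
        by_cases hw : v = "*" ∨ v = ""
        · exact absurd (h1 (k, v) List.mem_cons_self hw) hk
        · have := h2 (k, v) List.mem_cons_self hw
          exact absurd (List.mem_map.mpr ⟨(k, v), this, rfl⟩) hk
    | some q =>
      have hq1 : q.1 = k := by
        have := List.find?_some hfind
        simpa using this
      have hqmem : q ∈ r := List.mem_of_find?_eq_some hfind
      have hkmem : k ∈ r.map Prod.fst := List.mem_map.mpr ⟨q, hqmem, hq1⟩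
      by_cases hw : v = "*" ∨ v = ""
      · have hwb : (v == "*" || v == "") = true := by
          rcases hw with h | h <;> simp [h]
        simp only [hwb, if_true]
        rw [ih]
        constructor
        · rintro ⟨h1, h2⟩
          refine ⟨?_, ?_⟩
          · intro p hp hpw
            rcases List.mem_cons.mp hp with h | h
            · subst h; exact hkmem
            · exact h1 p h hpw
          · intro p hp hpw
            rcases List.mem_cons.mp hp with h | h
            · subst h; exact absurd hw hpw
            · exact h2 p h hpw
        · rintro ⟨h1, h2⟩
          exact ⟨fun p hp => h1 p (List.mem_cons_of_mem _ hp),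
                 fun p hp => h2 p (List.mem_cons_of_mem _ hp)⟩
      · have hwb : (v == "*" || v == "") = false := by
          simp only [not_or] at hw
          simp [hw.1, hw.2]
        simp only [hwb, Bool.false_eq_true, if_false]
        by_cases hqv : q.2 = v
        · have hmem : (k, v) ∈ r := by
            have : q = (k, v) := Prod.ext hq1 hqv
            rwa [this] at hqmem
          simp only [hqv, beq_self_eq_true, if_true]
          rw [ih]
          constructor
          · rintro ⟨h1, h2⟩
            refine ⟨?_, ?_⟩
            · intro p hp hpw
              rcases List.mem_cons.mp hp with h | h
              · subst h; exact absurd hpw hw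
              · exact h1 p h hpw
            · intro p hp hpw
              rcases List.mem_cons.mp hp with h | h
              · subst h; exact hmem
              · exact h2 p h hpw
          · rintro ⟨h1, h2⟩
            exact ⟨fun p hp => h1 p (List.mem_cons_of_mem _ hp),
                   fun p hp => h2 p (List.mem_cons_of_mem _ hp)⟩
        · have hqvb : (q.2 == v) = false := by simp [hqv]
          simp only [hqvb, Bool.false_eq_true, if_false]
          constructor
          · intro h; cases h
          · rintro ⟨h1, h2⟩
            have hmem := h2 (k, v) List.mem_cons_self hw
            have := find_eq_of_mem r hr k v hmem
            rw [hfind] at this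
            have hq : q = (k, v) := by injection this
            exact absurd (by rw [hq]) hqv

theorem alt_iff (r f : List (String × String)) :
    matches_tags_py_alt r f = true ↔
      ((∀ p ∈ f, (p.2 = "*" ∨ p.2 = "") → p.1 ∈ r.map Prod.fst) ∧
       (∀ p ∈ f, ¬(p.2 = "*" ∨ p.2 = "") → p ∈ r)) := by
  simp only [matches_tags_py_alt, Bool.and_eq_true, PySem.Set.issubset_iff,
    PySem.Set.mem_ofList, List.mem_map, List.mem_filter]
  constructor
  · rintro ⟨h1, h2⟩
    refine ⟨?_, ?_⟩
    · intro p hp hpw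
      refine h1 p.1 ⟨p, ⟨hp, ?_⟩, rfl⟩
      rcases hpw with h | h <;> simp [h]
    · intro p hp hpw
      refine h2 p ⟨hp, ?_⟩
      simp only [not_or] at hpw
      simp [hpw.1, hpw.2]
  · rintro ⟨h1, h2⟩
    refine ⟨?_, ?_⟩
    · rintro x ⟨p, ⟨hp, hpw⟩, rfl⟩
      refine h1 p hp ?_
      rcases Bool.or_eq_true _ _ |>.mp hpw with h | h
      · exact Or.inl (by simpa using h)
      · exact Or.inr (by simpa using h)
    · rintro p ⟨hp, hpw⟩
      refine h2 p hp ?_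
      simp only [not_or]
      constructor <;> intro hc <;> simp [hc] at hpw

-- ===== VERDICT (by name: the statement is the Claim_ definition above) =====
theorem matches_tags_py_spec : Claim_equal_matches_tags_py := by
  intro r f _ hpre
  unfold Spec_matches_tags_py matches_tags_py
  by_cases hf : f.isEmpty
  · have : f = [] := List.isEmpty_iff.mp hf
    subst this
    simp [matches_tags_py_alt, PySem.Set.issubset]
  · simp only [hf, Bool.false_eq_true, if_false]
    by_cases hrr : r.isEmpty
    · have hre : r = [] := List.isEmpty_iff.mp hrr
      subst hre
      simp only [hrr, if_true]
      obtain ⟨p, f', rfl⟩ : ∃ p f', f = p :: f' := by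
        cases f with
        | nil => simp at hf
        | cons a t => exact ⟨a, t, rfl⟩
      by_cases hpw : p.2 = "*" ∨ p.2 = ""
      · have : ¬ matches_tags_py_alt [] (p :: f') = true := by
          rw [alt_iff]
          rintro ⟨h1, _⟩
          simpa using h1 p List.mem_cons_self hpw
        cases h : matches_tags_py_alt [] (p :: f')
        · rfl
        · exact absurd h this
      · have : ¬ matches_tags_py_alt [] (p :: f') = true := by
          rw [alt_iff]
          rintro ⟨_, h2⟩
          simpa using h2 p List.mem_cons_self hpw
        cases h : matches_tags_py_alt [] (p :: f')
        · rfl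
        · exact absurd h this
    · simp only [hrr, Bool.false_eq_true, if_false]
      have := (loop_iff r f hpre.1).trans (alt_iff r f).symm
      cases hA : matchesTagsLoop r f <;> cases hB : matches_tags_py_alt r f
      · rfl
      · exact absurd (this.mpr hB) (by simp [hA])
      · exact absurd (this.mp hA) (by simp [hB])
      · rfl
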